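-- pv_equiv track=rewrite | github.com/lucaskoensgen/pcs_scraper | pcs-py/utility/convert_data.py | printed_rider_to_first_last
-- ===== SOURCE A (Python) =====
-- def printed_rider_to_first_last(printed_name: str):
--     """
--     Changes a name written as "LAST First" on PCS website to "First Last" format
--
--     Args:
--         printed_name (str): the input name in LAST First format
--
--     Returns:
--         str: the output name in First Last format
--     """
--
--     # name is last first, need to re order - first step is split into seperate strings
--     rider_names = printed_name.split(' ')
--     # preset names to empty list
--     first_name = []
--     last_name = []
--     # loop through the list of the name strings
--     for name in rider_names:
--         # if all uppercase then make lower and capitalize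
--         if name.isupper():
--             last_name = last_name + [name.lower().capitalize()]
--         # if not uppercase then its the first name
--         else:
--             first_name = first_name + [name]
--
--     # make the organized name back into single string again
--     rider_name_list = first_name + last_name
--     new_name = " ".join(rider_name_list)
--
--     return new_name
-- ===== SOURCE B (Python) =====
-- def printed_rider_to_first_last(printed_name: str):
--     # Stable sort by the boolean key keeps non-uppercase (first-name) tokens,
--     # in order, before uppercase (last-name) tokens, in order.
--     tokens = sorted(printed_name.split(' '), key=str.isupper)
--     return ' '.join(w.lower().capitalize() if w.isupper() else w for w in tokens)
-- ===== Notes on version B (the rewrite author's own statement) =====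
-- stated objective: alternative
-- what changed: Replaces the two-accumulator partition loop with a stable sort by the boolean isupper key followed by a single map-and-join pass.
import Mathlib
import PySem

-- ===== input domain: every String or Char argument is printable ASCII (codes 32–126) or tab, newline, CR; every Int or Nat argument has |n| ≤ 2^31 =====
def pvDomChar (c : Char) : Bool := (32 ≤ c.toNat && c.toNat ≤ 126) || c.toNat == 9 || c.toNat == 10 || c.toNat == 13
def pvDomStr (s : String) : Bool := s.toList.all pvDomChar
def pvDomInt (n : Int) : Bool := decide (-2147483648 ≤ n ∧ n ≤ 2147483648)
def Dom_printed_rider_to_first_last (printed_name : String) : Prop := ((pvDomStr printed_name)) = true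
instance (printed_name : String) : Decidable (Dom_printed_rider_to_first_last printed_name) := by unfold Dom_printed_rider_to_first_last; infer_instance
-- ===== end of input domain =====

-- B reorders the tokens with one stable sort on the boolean isupper key and one
-- map-and-join pass, instead of A's loop partitioning into two accumulator lists.


-- ===== PORT A =====
-- str.isupper(): at least one cased character and no lowercase one (exact on ASCII,
-- where the cased characters are exactly the letters).
def pyStrIsupper (s : String) : Bool :=
  (s.toList.any (fun c => PySem.Chars.isupper c || PySem.Chars.islower c)) &&
  (s.toList.all (fun c => !PySem.Chars.islower c))

-- str.capitalize(): first character uppercased, the rest lowercased (exact on ASCII).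
def pyCapitalize (s : String) : String :=
  match s.toList with
  | [] => String.ofList []
  | c :: cs => String.ofList (PySem.Chars.upperChar c :: PySem.Chars.lower cs)

-- s.split(' '): the separator " " is non-empty, so PySem.Str.split? is always some.
def pySplitSpace (s : String) : List String := (PySem.Str.split? s " ").getD []

def printed_rider_to_first_last (printed_name : String) : String :=
  let rider_names := pySplitSpace printed_name
  let fl := rider_names.foldl
    (fun (acc : List String × List String) name =>
      if pyStrIsupper name then
        (acc.1, acc.2 ++ [pyCapitalize (PySem.Str.lower name)])
      else
        (acc.1 ++ [name], acc.2))
    ([], [])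
  let rider_name_list := fl.1 ++ fl.2
  PySem.Str.join " " rider_name_list

-- ===== PORT B =====
def printed_rider_to_first_last_alt (printed_name : String) : String :=
  -- key=str.isupper sorts bools as 0/1 in Python; ported as the Nat key 0/1
  let tokens := PySem.List.sorted (pySplitSpace printed_name)
    (fun w => if pyStrIsupper w then (1 : Nat) else 0)
  PySem.Str.join " "
    (tokens.map (fun w => if pyStrIsupper w then pyCapitalize (PySem.Str.lower w) else w))

-- ===== PRECONDITION & SPEC =====
def Spec_printed_rider_to_first_last (printed_name : String) (out : String) : Prop := out = printed_rider_to_first_last_alt printed_name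
instance (printed_name : String) (out : String) : Decidable (Spec_printed_rider_to_first_last printed_name out) := by unfold Spec_printed_rider_to_first_last; infer_instance

-- ===== CLAIM (what is proved, stated in full; the proofs are below) =====
def Claim_equal_printed_rider_to_first_last : Prop := ∀ (printed_name : String), Dom_printed_rider_to_first_last printed_name → Spec_printed_rider_to_first_last printed_name (printed_rider_to_first_last printed_name)

-- ===== LEMMAS AND PROOFS =====

-- Inserting x into A ++ B passes over all of A when x goes before no element of A.
theorem insertBy_append_of_not_before {α : Type} (before : α → α → Bool) (x : α)
    (A B : List α) (h : ∀ a ∈ A, before x a = false) :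
    PySem.List.insertBy before x (A ++ B) = A ++ PySem.List.insertBy before x B := by
  induction A with
  | nil => simp
  | cons a A ih =>
      simp only [List.cons_append, PySem.List.insertBy, h a (by simp)]
      simp only [Bool.false_eq_true, if_false, List.cons.injEq, true_and]
      exact ih (fun a ha => h a (by simp [ha]))

-- A stable sort by a two-valued key is the stable partition: key-0 elements in
-- order, then key-1 elements in order.
theorem sorted_bool_key {α : Type} (p : α → Bool) (xs : List α) :
    PySem.List.sorted xs (fun x => if p x then (1 : Nat) else 0) false
      = xs.filter (fun x => !p x) ++ xs.filter p := by
  rw [PySem.List.sorted_eq_foldl_insertBy]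
  suffices h : ∀ (ys : List α) (A B : List α),
      (∀ a ∈ A, p a = false) → (∀ b ∈ B, p b = true) →
      ys.foldl (fun acc x => PySem.List.insertBy
        (fun a b => decide ((if p a then (1:Nat) else 0) < (if p b then (1:Nat) else 0))) x acc)
        (A ++ B)
      = (A ++ ys.filter (fun x => !p x)) ++ (B ++ ys.filter p) by
    simpa using h xs [] [] (by simp) (by simp)
  intro ys
  induction ys with
  | nil => intro A B _ _; simp
  | cons y ys ih =>
      intro A B hA hB
      simp only [List.foldl_cons]
      by_cases hy : p y = true
      · -- y goes to the end: it is before no element of A ++ B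
        have step : PySem.List.insertBy
            (fun a b => decide ((if p a then (1:Nat) else 0) < (if p b then (1:Nat) else 0))) y (A ++ B)
            = (A ++ B) ++ [y] := by
          have h0 : ∀ a ∈ A ++ B,
              (fun a b => decide ((if p a then (1:Nat) else 0) < (if p b then (1:Nat) else 0))) y a = false := by
            intro a _; simp [hy]
            split <;> simp
          simpa [PySem.List.insertBy] using
            insertBy_append_of_not_before _ y (A ++ B) [] h0
        rw [step, List.append_assoc,
            ih A (B ++ [y]) hA (by
              intro b hb
              rcases List.mem_append.mp hb with h | h
              · exact hB b h
              · simpa using (List.mem_singleton.mp h ▸ hy))]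
        simp [hy, List.append_assoc]
      · have hy' : p y = false := by simpa using hy
        have step : PySem.List.insertBy
            (fun a b => decide ((if p a then (1:Nat) else 0) < (if p b then (1:Nat) else 0))) y (A ++ B)
            = (A ++ [y]) ++ B := by
          rw [insertBy_append_of_not_before _ _ _ _ (fun a ha => by simp [hy', hA a ha])]
          cases B with
          | nil => simp [PySem.List.insertBy]
          | cons b B' =>
              simp [PySem.List.insertBy, hy', hB b (by simp)]
        rw [step,
            ih (A ++ [y]) B (by
              intro a ha
              rcases List.mem_append.mp ha with h | h
              · exact hA a h
              · simpa using (List.mem_singleton.mp h ▸ hy')) hB]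
        simp [hy', List.append_assoc]

-- A's partition loop computes the two filters.
theorem foldl_partition (up : String → Bool) (cap : String → String) :
    ∀ (toks : List String) (A B : List String),
      toks.foldl
        (fun (acc : List String × List String) name =>
          if up name then (acc.1, acc.2 ++ [cap name]) else (acc.1 ++ [name], acc.2))
        (A, B)
      = (A ++ toks.filter (fun n => !up n), B ++ (toks.filter up).map cap) := by
  intro toks
  induction toks with
  | nil => intro A B; simp
  | cons t ts ih =>
      intro A B
      simp only [List.foldl_cons]
      by_cases ht : up t = true
      · rw [if_pos ht, ih]
        simp [ht]
      · have ht' : up t = false := by simpa using ht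
        rw [if_neg (by simp [ht']), ih]
        simp [ht']

-- ===== VERDICT (by name: the statement is the Claim_ definition above) =====
theorem printed_rider_to_first_last_spec : Claim_equal_printed_rider_to_first_last := by
  intro s _
  unfold Spec_printed_rider_to_first_last printed_rider_to_first_last printed_rider_to_first_last_alt
  simp only [foldl_partition, sorted_bool_key, List.nil_append, List.map_append]
  congr 1
  symm
  congr 1
  · have hcong : ∀ w ∈ (pySplitSpace s).filter (fun n => !pyStrIsupper n),
        (fun w => if pyStrIsupper w then pyCapitalize (PySem.Str.lower w) else w) w = id w := by
      intro w hw
      have := List.of_mem_filter hw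
      simp only [Bool.not_eq_eq_eq_not, Bool.not_true] at this
      simp [this]
    rw [List.map_congr_left hcong, List.map_id]
  · refine List.map_congr_left ?_
    intro w hw
    have := List.of_mem_filter hw
    simp [this]
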